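-- pv_equiv track=rewrite | github.com/dachachacha/wordalizer | create_pages2.py | create_lines
-- ===== SOURCE A (Python) =====
-- char_per_line = 55
--
-- lines_per_page = 35
--
-- def create_lines(bag, nlines = lines_per_page):
--     lines = []
--     words = []
--     char_cnt = 0
--     while char_cnt < char_per_line and bag:
--         new = bag.pop()
--         words.append(new)
--         char_cnt += len(new)
--     lines.append(" ".join(words))
--     nlines -= 1
--     if nlines ==  0:
--         lines += [""]
--         nlines = lines_per_page
--     if bag:
--         return lines + create_lines(bag, nlines)
--     else: return lines
-- ===== SOURCE B (Python) =====
-- # B: two single passes (chunk the words, then join + insert page breaks) instead of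
-- # A's interleaved recursion; like A it leaves bag empty (mutation mirrored).
-- char_per_line = 55
--
-- lines_per_page = 35
--
-- def create_lines(bag, nlines=lines_per_page):
--     seq = bag[::-1]
--     del bag[:]  # A empties bag in place; mirror that side effect
--     # pass 1: greedy chunking into lines
--     chunks = []
--     cur = []
--     cnt = 0
--     for w in seq:
--         cur.append(w)
--         cnt += len(w)
--         if cnt >= char_per_line:
--             chunks.append(cur)
--             cur = []
--             cnt = 0
--     if cur or not chunks:
--         chunks.append(cur)
--     # pass 2: join each chunk, blank line after every lines_per_page-th line
--     out = []
--     n = nlines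
--     for ch in chunks:
--         out.append(" ".join(ch))
--         n -= 1
--         if n == 0:
--             out.append("")
--             n = lines_per_page
--     return out
-- ===== Notes on version B (the rewrite author's own statement) =====
-- stated objective: alternative
-- what changed: B replaces A's interleaved recursion (pop words, emit line, maybe page-break, recurse, concatenating result lists) by two independent single passes: first greedily chunk the reversed word list into lines, then join each chunk and insert a blank page-break line every lines_per_page lines.
import Mathlib
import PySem

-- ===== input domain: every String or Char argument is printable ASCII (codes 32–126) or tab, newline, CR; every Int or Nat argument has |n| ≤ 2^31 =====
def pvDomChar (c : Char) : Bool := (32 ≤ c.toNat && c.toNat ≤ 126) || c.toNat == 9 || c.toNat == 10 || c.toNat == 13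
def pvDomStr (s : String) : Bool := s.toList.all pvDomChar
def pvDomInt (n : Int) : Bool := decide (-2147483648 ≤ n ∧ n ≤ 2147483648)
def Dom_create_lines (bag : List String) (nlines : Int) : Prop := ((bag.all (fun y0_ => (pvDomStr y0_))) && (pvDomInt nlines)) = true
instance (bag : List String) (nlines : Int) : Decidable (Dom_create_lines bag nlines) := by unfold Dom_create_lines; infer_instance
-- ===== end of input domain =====

-- B: two independent single passes (greedy chunking, then join + page breaks) instead of
-- A's interleaved recursion; equivalence is about the RETURN value (both leave bag empty).

-- ===== PORT A =====
-- inner 'while char_cnt < char_per_line and bag' loop: pops from the end of bag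
def packA (bag words : List String) (cnt : Int) : List String × List String × Int :=
  if h : cnt < 55 ∧ bag ≠ [] then
    let new := bag.getLast h.2
    packA bag.dropLast (words ++ [new]) (cnt + PySem.Str.len new)
  else (bag, words, cnt)
termination_by bag.length
decreasing_by
  have hpos : 0 < bag.length := List.length_pos_iff.mpr h.2
  simp [List.length_dropLast]
  omega

theorem packA_nil (words : List String) (cnt : Int) :
    packA [] words cnt = ([], words, cnt) := by
  rw [packA.eq_def]; simp

theorem packA_fst_length_le (bag words : List String) (cnt : Int) :
    (packA bag words cnt).1.length ≤ bag.length := by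
  induction hn : bag.length using Nat.strong_induction_on generalizing bag words cnt with
  | _ n ih =>
    subst hn
    rw [packA.eq_def]
    split
    next h =>
      have hpos : 0 < bag.length := List.length_pos_iff.mpr h.2
      have hd : bag.dropLast.length < bag.length := by simp [List.length_dropLast]; omega
      exact le_trans (ih _ hd _ _ _ rfl) (Nat.le_of_lt hd)
    next h => simp

theorem packA_fst_length_lt (bag words : List String) (cnt : Int)
    (h55 : cnt < 55) (hne : bag ≠ []) :
    (packA bag words cnt).1.length < bag.length := by
  rw [packA.eq_def]
  simp only [h55, hne, ne_eq, not_false_iff, and_self, dite_true]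
  have h1 := packA_fst_length_le bag.dropLast (words ++ [bag.getLast hne]) (cnt + PySem.Str.len (bag.getLast hne))
  have h2 : 0 < bag.length := List.length_pos_iff.mpr hne
  simp only [List.length_dropLast] at h1 ⊢
  omega

def create_lines (bag : List String) (nlines : Int) : List String :=
  let lines := [PySem.Str.join " " (packA bag [] 0).2.1]
  let n := nlines - 1
  let lines2 := if n = 0 then lines ++ [""] else lines
  let n2 := if n = 0 then (35 : Int) else n
  if h : (packA bag [] 0).1 ≠ [] then lines2 ++ create_lines (packA bag [] 0).1 n2 else lines2
termination_by bag.length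
decreasing_by
  by_cases hb : bag = []
  · subst hb; rw [packA_nil] at h; simp at h
  · exact packA_fst_length_lt bag [] 0 (by norm_num) hb

-- ===== PORT B =====
-- pass 1 body: cur.append(w); cnt += len(w); if cnt >= 55: flush chunk
def chunkStep (st : List (List String) × List String × Int) (w : String) :
    List (List String) × List String × Int :=
  let cur := st.2.1 ++ [w]
  let cnt := st.2.2 + PySem.Str.len w
  if 55 ≤ cnt then (st.1 ++ [cur], [], 0) else (st.1, cur, cnt)

-- pass 1: greedy chunking, then 'if cur or not chunks: chunks.append(cur)'
def mkChunks (ws : List String) : List (List String) :=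
  let st := ws.foldl chunkStep ([], [], 0)
  if st.2.1 ≠ [] ∨ st.1 = [] then st.1 ++ [st.2.1] else st.1

-- pass 2 body: out.append(" ".join(ch)); n -= 1; if n == 0: out.append(""); n = 35
def lineStep (st : List String × Int) (ch : List String) : List String × Int :=
  let out := st.1 ++ [PySem.Str.join " " ch]
  let n := st.2 - 1
  if n = 0 then (out ++ [""], 35) else (out, n)

def create_lines_alt (bag : List String) (nlines : Int) : List String :=
  ((mkChunks bag.reverse).foldl lineStep ([], nlines)).1

-- ===== PRECONDITION & SPEC =====
def Spec_create_lines (bag : List String) (nlines : Int) (out : List String) : Prop := out = create_lines_alt bag nlines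
instance (bag : List String) (nlines : Int) (out : List String) : Decidable (Spec_create_lines bag nlines out) := by unfold Spec_create_lines; infer_instance

-- ===== CLAIM (what is proved, stated in full; the proofs are below) =====
def Claim_equal_create_lines : Prop := ∀ (bag : List String) (nlines : Int), Dom_create_lines bag nlines → Spec_create_lines bag nlines (create_lines bag nlines)

-- ===== LEMMAS AND PROOFS =====

-- greedy split of the (reversed) word list: what A's inner while loop takes, and what remains
def greedy : List String → Int → List String × List String
  | [], _ => ([], [])
  | w :: ws, cnt =>
      if cnt < 55 then
        let p := greedy ws (cnt + PySem.Str.len w)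
        (w :: p.1, p.2)
      else ([], w :: ws)

theorem greedy_nil (cnt : Int) : greedy [] cnt = ([], []) := rfl

theorem greedy_cons_lt (w : String) (ws : List String) (cnt : Int) (h : cnt < 55) :
    greedy (w :: ws) cnt =
      (w :: (greedy ws (cnt + PySem.Str.len w)).1, (greedy ws (cnt + PySem.Str.len w)).2) := by
  simp only [greedy, h, if_true]

theorem greedy_cons_ge (w : String) (ws : List String) (cnt : Int) (h : ¬ cnt < 55) :
    greedy (w :: ws) cnt = ([], w :: ws) := by
  simp only [greedy, h, if_false]

theorem greedy_append (ws : List String) (cnt : Int) :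
    (greedy ws cnt).1 ++ (greedy ws cnt).2 = ws := by
  induction ws generalizing cnt with
  | nil => simp [greedy]
  | cons w ws ih =>
      by_cases h : cnt < 55 <;> simp [greedy, h, ih]

theorem greedy_fst_ne (ws : List String) (cnt : Int) (hne : ws ≠ []) (h55 : cnt < 55) :
    (greedy ws cnt).1 ≠ [] := by
  cases ws with
  | nil => exact absurd rfl hne
  | cons w ws => simp [greedy, h55]

-- A's inner loop, expressed through greedy
theorem packA_greedy (ws : List String) (words : List String) (cnt : Int) :
    packA ws.reverse words cnt =
      ((greedy ws cnt).2.reverse, words ++ (greedy ws cnt).1,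
        cnt + ((greedy ws cnt).1.map PySem.Str.len).sum) := by
  induction ws generalizing words cnt with
  | nil => simp [greedy, packA_nil]
  | cons w ws ih =>
      by_cases h : cnt < 55
      · have hrev : (w :: ws).reverse = ws.reverse ++ [w] := by simp
        rw [hrev, packA]
        have hne : ws.reverse ++ [w] ≠ [] := by simp
        simp only [h, hne, ne_eq, not_false_iff, and_self, dite_true,
          List.getLast_concat, List.dropLast_concat]
        rw [ih]
        simp [greedy, h, List.append_assoc]
        ring
      · rw [packA]
        simp [greedy, h]

-- the chunks accumulator is only appended to
theorem foldl_chunkStep_prefix (ws : List String) (chunks : List (List String))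
    (cur : List String) (cnt : Int) :
    ws.foldl chunkStep (chunks, cur, cnt) =
      (chunks ++ (ws.foldl chunkStep ([], cur, cnt)).1,
        (ws.foldl chunkStep ([], cur, cnt)).2) := by
  induction ws generalizing chunks cur cnt with
  | nil => simp
  | cons w ws ih =>
      simp only [List.foldl_cons]
      by_cases h : 55 ≤ cnt + PySem.Str.len w
      · simp only [chunkStep, h, if_true]
        rw [ih (chunks ++ [cur ++ [w]]) [] 0, ih ([] ++ [cur ++ [w]]) [] 0]
        simp
      · simp only [chunkStep, h, if_false]
        exact ih chunks (cur ++ [w]) (cnt + PySem.Str.len w)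

-- after at least one word, chunks or cur is non-empty
theorem foldl_chunkStep_ne (ws : List String) (st : List (List String) × List String × Int)
    (hne : ws ≠ []) :
    (ws.foldl chunkStep st).1 ≠ [] ∨ (ws.foldl chunkStep st).2.1 ≠ [] := by
  induction ws generalizing st with
  | nil => exact absurd rfl hne
  | cons w ws ih =>
      simp only [List.foldl_cons]
      cases ws with
      | nil =>
          simp only [List.foldl_nil, chunkStep]
          split
          · exact Or.inl (by simp)
          · exact Or.inr (by simp)
      | cons v vs => exact ih _ (by simp)

-- if greedy leaves a remainder, the fold first flushes exactly the greedy chunk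
theorem foldl_chunkStep_greedy_rem (ws : List String) (cnt : Int)
    (chunks : List (List String)) (cur : List String)
    (h55 : cnt < 55) (hrem : (greedy ws cnt).2 ≠ []) :
    ws.foldl chunkStep (chunks, cur, cnt) =
      (greedy ws cnt).2.foldl chunkStep (chunks ++ [cur ++ (greedy ws cnt).1], [], 0) := by
  induction ws generalizing cnt chunks cur with
  | nil => simp [greedy] at hrem
  | cons w ws ih =>
      rw [greedy_cons_lt w ws cnt h55] at hrem ⊢
      simp only [PySem.Str.len_eq] at hrem ⊢
      by_cases h : 55 ≤ cnt + (w.length : Int)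
      · have hlt : ¬ (cnt + (w.length : Int) < 55) := by omega
        cases ws with
        | nil => simp [greedy_nil] at hrem
        | cons v vs =>
            rw [greedy_cons_ge v vs _ (by simpa using hlt)] at hrem ⊢
            have hstep : chunkStep (chunks, cur, cnt) w = (chunks ++ [cur ++ [w]], [], 0) := by
              simp [chunkStep, h]
            simp only [List.foldl_cons]
            rw [hstep]
      · have hlt : cnt + (w.length : Int) < 55 := by omega
        have hstep : chunkStep (chunks, cur, cnt) w = (chunks, cur ++ [w], cnt + (w.length : Int)) := by
          simp [chunkStep, h]
        simp only [List.foldl_cons]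
        rw [hstep, ih (cnt + (w.length : Int)) chunks (cur ++ [w]) hlt hrem]
        simp

-- if greedy consumes everything, the fold ends with exactly one (possibly flushed) chunk
theorem foldl_chunkStep_greedy_all (ws : List String) (cnt : Int)
    (chunks : List (List String)) (cur : List String)
    (h55 : cnt < 55) (hrem : (greedy ws cnt).2 = []) :
    ws.foldl chunkStep (chunks, cur, cnt) = (chunks ++ [cur ++ (greedy ws cnt).1], [], 0)
    ∨ ∃ c, ws.foldl chunkStep (chunks, cur, cnt) = (chunks, cur ++ (greedy ws cnt).1, c) := by
  induction ws generalizing cnt chunks cur with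
  | nil => right; exact ⟨cnt, by simp [greedy]⟩
  | cons w ws ih =>
      rw [greedy_cons_lt w ws cnt h55] at hrem ⊢
      simp only [PySem.Str.len_eq] at hrem ⊢
      by_cases h : 55 ≤ cnt + (w.length : Int)
      · have hlt : ¬ (cnt + (w.length : Int) < 55) := by omega
        cases ws with
        | nil =>
            left
            simp [List.foldl_cons, chunkStep, h, greedy_nil]
        | cons v vs => rw [greedy_cons_ge v vs _ (by simpa using hlt)] at hrem; simp at hrem
      · have hlt : cnt + (w.length : Int) < 55 := by omega
        have hstep : chunkStep (chunks, cur, cnt) w = (chunks, cur ++ [w], cnt + (w.length : Int)) := by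
          simp [chunkStep, h]
        simp only [List.foldl_cons]
        rw [hstep]
        rcases ih (cnt + (w.length : Int)) chunks (cur ++ [w]) hlt hrem with h1 | ⟨c, h1⟩
        · left; rw [h1]; simp
        · right; exact ⟨c, by rw [h1]; simp⟩

-- mkChunks peels off the first greedy chunk when a remainder is left
theorem mkChunks_cons (ws : List String) (hrem : (greedy ws 0).2 ≠ []) :
    mkChunks ws = (greedy ws 0).1 :: mkChunks (greedy ws 0).2 := by
  unfold mkChunks
  rw [foldl_chunkStep_greedy_rem ws 0 [] [] (by norm_num) hrem,
      foldl_chunkStep_prefix]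
  rcases foldl_chunkStep_ne (greedy ws 0).2 ([], [], 0) hrem with h | h
  · simp only [List.nil_append]
    by_cases hc : ((greedy ws 0).2.foldl chunkStep ([], [], 0)).2.1 ≠ [] <;> simp [hc, h]
  · simp only [List.nil_append]
    simp [h]

-- mkChunks is a single greedy chunk when greedy consumes everything
theorem mkChunks_single (ws : List String) (hne : ws ≠ []) (hrem : (greedy ws 0).2 = []) :
    mkChunks ws = [(greedy ws 0).1] := by
  unfold mkChunks
  rcases foldl_chunkStep_greedy_all ws 0 [] [] (by norm_num) hrem with h | ⟨c, h⟩
  · simp [h]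
  · have : (greedy ws 0).1 ≠ [] := greedy_fst_ne ws 0 hne (by norm_num)
    simp [h, this]

-- structural form of B's second pass
def emit : List (List String) → Int → List String
  | [], _ => []
  | ch :: rest, n =>
      let n' := n - 1
      if n' = 0 then PySem.Str.join " " ch :: "" :: emit rest 35
      else PySem.Str.join " " ch :: emit rest n'

theorem foldl_lineStep_emit (chunks : List (List String)) (acc : List String) (n : Int) :
    (chunks.foldl lineStep (acc, n)).1 = acc ++ emit chunks n := by
  induction chunks generalizing acc n with
  | nil => simp [emit]
  | cons ch rest ih =>
      simp only [List.foldl_cons, emit]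
      by_cases h : n - 1 = 0
      · simp only [lineStep, h, if_true]
        rw [ih]; simp
      · simp only [lineStep, h, if_false]
        rw [ih]; simp

theorem greedy_snd_length_lt (ws : List String) (hne : ws ≠ []) :
    (greedy ws 0).2.length < ws.length := by
  have h := greedy_append ws 0
  have h1 : (greedy ws 0).1 ≠ [] := greedy_fst_ne ws 0 hne (by norm_num)
  have := congrArg List.length h
  simp only [List.length_append] at this
  have : 0 < (greedy ws 0).1.length := List.length_pos_iff.mpr h1
  omega

-- main: A on the reversed list computes emit of the chunking
theorem create_lines_emit (ws : List String) (n : Int) :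
    create_lines ws.reverse n = emit (mkChunks ws) n := by
  induction hlen : ws.length using Nat.strong_induction_on generalizing ws n with
  | _ len ih =>
  subst hlen
  rw [create_lines]
  rw [packA_greedy ws [] 0]
  by_cases hws : ws = []
  · subst hws
    simp only [greedy, mkChunks, List.foldl_nil]
    simp [emit]
  · by_cases hrem : (greedy ws 0).2 = []
    · rw [dif_neg (by simp [hrem])]
      rw [mkChunks_single ws hws hrem]
      simp only [emit, List.nil_append]
      by_cases h : n - 1 = 0 <;> simp [h]
    · have hne' : (greedy ws 0).2.reverse ≠ [] := by simp [hrem]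
      simp only [hne', ne_eq, not_false_iff, dite_true]
      rw [mkChunks_cons ws hrem]
      have hlt : (greedy ws 0).2.length < ws.length := greedy_snd_length_lt ws hws
      rw [ih (greedy ws 0).2.length (by simpa using hlt) (greedy ws 0).2 _ (by simp)]
      simp only [emit, List.nil_append]
      by_cases h : n - 1 = 0 <;> simp [h]

-- ===== VERDICT (by name: the statement is the Claim_ definition above) =====
theorem create_lines_spec : Claim_equal_create_lines := by
  intro bag nlines _
  unfold Spec_create_lines create_lines_alt
  rw [foldl_lineStep_emit]
  have := create_lines_emit bag.reverse nlines
  simp only [List.reverse_reverse] at this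
  rw [this]
  simp
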